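-- pv_equiv track=rewrite | github.com/jpkelly/rainshine | rainshine_dmx.py | build_pixel_map
-- ===== SOURCE A (Python) =====
-- def build_pixel_map(cols, rows):
--     """
--     Returns a list mapping GL pixel index → DMX channel offset.
--     Layout: zigzag strip, column-major.
--       Col 0: bottom-to-top (pixel 0 at bottom = GL row 0)
--       Col 1: top-to-bottom (pixel 30 at top = GL row 29)
--       Col 2: bottom-to-top, etc.
--     """
--     pixel_map = [0] * (cols * rows)
--     dmx_idx = 0
--     for col in range(cols):
--         for step in range(rows):
--             if col % 2 == 0:
--                 # Even columns: bottom-to-top → GL row 0..29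
--                 gl_row = step
--             else:
--                 # Odd columns: top-to-bottom → GL row 29..0
--                 gl_row = (rows - 1) - step
--             pixel_map[gl_row * cols + col] = dmx_idx * 3
--             dmx_idx += 1
--     return pixel_map
-- ===== SOURCE B (Python) =====
-- def build_pixel_map(cols, rows):
--     """
--     Returns a list mapping GL pixel index -> DMX channel offset.
--     Built directly in output (row-major) order: the DMX pixel index of the
--     cell at (gl_row, col) is col*rows + step, where step = gl_row on even
--     (bottom-to-top) columns and rows-1-gl_row on odd (top-to-bottom) ones.
--     """
--     if cols <= 0 or rows <= 0:
--         return []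
--     return [(col * rows + (gl_row if col % 2 == 0 else rows - 1 - gl_row)) * 3
--             for gl_row in range(rows)
--             for col in range(cols)]
-- ===== Notes on version B (the rewrite author's own statement) =====
-- stated objective: simpler
-- what changed: Instead of scatter-writing a preallocated list in DMX order with a running dmx_idx counter, B emits the list sequentially in output (row-major) order as a comprehension, computing each cell's DMX offset by the closed form (col*rows + step)*3 with step = gl_row or rows-1-gl_row.
-- intended difference: When both cols and rows are negative, A returns a list of cols*rows zeros (an artifact of [0]*(cols*rows) with both loops never running); B returns the empty list, the intended result for a grid with no pixels. — e.g. on build_pixel_map(-1, -1): A returns [0], B returns []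
import Mathlib
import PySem

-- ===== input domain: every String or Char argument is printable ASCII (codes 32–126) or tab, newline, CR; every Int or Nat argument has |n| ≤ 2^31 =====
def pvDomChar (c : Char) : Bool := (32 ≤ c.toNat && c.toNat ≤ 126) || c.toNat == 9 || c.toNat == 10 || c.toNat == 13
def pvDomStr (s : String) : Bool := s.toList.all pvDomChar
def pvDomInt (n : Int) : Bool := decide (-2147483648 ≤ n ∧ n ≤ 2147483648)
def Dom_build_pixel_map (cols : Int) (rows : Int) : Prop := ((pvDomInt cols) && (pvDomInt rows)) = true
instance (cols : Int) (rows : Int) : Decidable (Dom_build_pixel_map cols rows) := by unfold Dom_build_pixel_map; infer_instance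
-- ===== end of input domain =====

-- B builds the map sequentially in output order from a closed-form channel index instead of
-- scatter-writing a preallocated list in DMX order with a running counter (objective: simpler).

-- ===== PORT A =====
-- The written index gl_row*cols+col lies in [0, cols*rows) whenever the loop body runs
-- (then 0 ≤ col < cols and 0 ≤ gl_row < rows), so Python's pixel_map[...] = v never
-- raises and the total PySem.List.pySetD is exact here.
def build_pixel_map (cols : Int) (rows : Int) : List Int :=
  let pixel_map : List Int := PySem.List.pyRepeat [(0 : Int)] (cols * rows)
  let st :=
    (PySem.List.pyRange 0 cols 1).foldl (fun (st : List Int × Int) col =>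
      (PySem.List.pyRange 0 rows 1).foldl (fun (st : List Int × Int) step =>
        let gl_row := if PySem.Int.mod col 2 = 0 then step else (rows - 1) - step
        (PySem.List.pySetD st.1 (gl_row * cols + col) (st.2 * 3), st.2 + 1)) st)
      (pixel_map, 0)
  st.1

-- ===== PORT B =====
def build_pixel_map_alt (cols : Int) (rows : Int) : List Int :=
  if cols ≤ 0 ∨ rows ≤ 0 then []
  else (PySem.List.pyRange 0 rows 1).flatMap (fun gl_row =>
    (PySem.List.pyRange 0 cols 1).map (fun col =>
      (col * rows + (if PySem.Int.mod col 2 = 0 then gl_row else rows - 1 - gl_row)) * 3))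

-- ===== PRECONDITION & SPEC =====
-- When both cols and rows are negative, A returns a list of cols*rows zeros (an artifact of
-- [0]*(cols*rows) with both loops never running); B returns the empty list, the intended
-- result for a grid with no pixels.
def D_build_pixel_map (cols : Int) (rows : Int) : Prop := cols < 0 ∧ rows < 0
instance (cols : Int) (rows : Int) : Decidable (D_build_pixel_map cols rows) := by unfold D_build_pixel_map; infer_instance

def Spec_build_pixel_map (cols : Int) (rows : Int) (out : List Int) : Prop :=
  ¬ D_build_pixel_map cols rows → out = build_pixel_map_alt cols rows
instance (cols : Int) (rows : Int) (out : List Int) : Decidable (Spec_build_pixel_map cols rows out) := by unfold Spec_build_pixel_map; infer_instance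

def pvDiffWitness_build_pixel_map : Int × Int := (-1, -1)
def pvDiffWitnessOut_build_pixel_map : (List Int) × (List Int) := ([0], [])

-- ===== CLAIM (what is proved, stated in full; the proofs are below) =====
def Claim_unchanged_build_pixel_map : Prop := ∀ (cols : Int) (rows : Int), Dom_build_pixel_map cols rows → Spec_build_pixel_map cols rows (build_pixel_map cols rows)
def Claim_changed_build_pixel_map : Prop := Dom_build_pixel_map (pvDiffWitness_build_pixel_map.1) (pvDiffWitness_build_pixel_map.2) ∧ D_build_pixel_map (pvDiffWitness_build_pixel_map.1) (pvDiffWitness_build_pixel_map.2) ∧ build_pixel_map (pvDiffWitness_build_pixel_map.1) (pvDiffWitness_build_pixel_map.2) = pvDiffWitnessOut_build_pixel_map.1 ∧ build_pixel_map_alt (pvDiffWitness_build_pixel_map.1) (pvDiffWitness_build_pixel_map.2) = pvDiffWitnessOut_build_pixel_map.2 ∧ pvDiffWitnessOut_build_pixel_map.1 ≠ pvDiffWitnessOut_build_pixel_map.2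
def Claim_exact_build_pixel_map : Prop := ∀ (cols : Int) (rows : Int), Dom_build_pixel_map cols rows → D_build_pixel_map cols rows → build_pixel_map cols rows ≠ build_pixel_map_alt cols rows

-- ===== LEMMAS AND PROOFS =====

-- the value placed at GL cell (row r, column k) of the grid (Nat coordinates)
def pvCell (rows : Int) (r k : Nat) : Int :=
  ((k : Int) * rows + (if k % 2 = 0 then (r : Int) else rows - 1 - (r : Int))) * 3

-- the first n iterations of A's inner loop for column value `col`
def pvInnerP (C R : Nat) (col : Int) (n : Nat) (st : List Int × Int) : List Int × Int :=
  (PySem.List.pyRange 0 (n : Int) 1).foldl (fun (st : List Int × Int) step =>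
    (PySem.List.pySetD st.1
      ((if PySem.Int.mod col 2 = 0 then step else ((R : Int) - 1) - step) * (C : Int) + col)
      (st.2 * 3), st.2 + 1)) st

-- the first m iterations of A's outer loop
def pvOuter (C R : Nat) (m : Nat) : List Int × Int :=
  (PySem.List.pyRange 0 (m : Int) 1).foldl (fun st col => pvInnerP C R col R st)
    (List.replicate (R * C) (0 : Int), 0)

theorem pvIdx_lt {C R r k : Nat} (hr : r < R) (hk : k < C) : r * C + k < R * C := by
  have h1 : r * C + k < (r + 1) * C := by rw [add_mul]; omega
  have h2 : (r + 1) * C ≤ R * C := Nat.mul_le_mul_right _ (by omega)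
  omega

theorem pvIdx_eq {C r k m c : Nat} (hC : 0 < C) (hk : k < C) (hc : c < C) :
    r * C + k = m * C + c ↔ r = m ∧ k = c := by
  constructor
  · intro h
    have h1 : (r * C + k) / C = r := by
      rw [mul_comm, Nat.mul_add_div hC, Nat.div_eq_of_lt hk]
      omega
    have h2 : (m * C + c) / C = m := by
      rw [mul_comm, Nat.mul_add_div hC, Nat.div_eq_of_lt hc]
      omega
    have hrm : r = m := by rw [← h1, ← h2, h]
    subst hrm
    omega
  · rintro ⟨rfl, rfl⟩; rfl

theorem pvMod_iff (c : Nat) : PySem.Int.mod (c : Int) 2 = 0 ↔ c % 2 = 0 := by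
  rw [PySem.Int.mod_eq_emod_of_pos (by omega)]; omega

theorem pvInnerP_spec (C R c : Nat) (hC : 0 < C) (hc : c < C) :
    ∀ (n : Nat), n ≤ R → ∀ (L : List Int) (d : Int), L.length = R * C →
    (pvInnerP C R (c : Int) n (L, d)).2 = d + n ∧
    (pvInnerP C R (c : Int) n (L, d)).1.length = R * C ∧
    ∀ r k, r < R → k < C →
      (pvInnerP C R (c : Int) n (L, d)).1[r * C + k]? =
        if k = c ∧ ((c % 2 = 0 ∧ r < n) ∨ (c % 2 ≠ 0 ∧ R - n ≤ r))
        then some ((d + (if c % 2 = 0 then (r : Int) else (R : Int) - 1 - (r : Int))) * 3)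
        else L[r * C + k]? := by
  intro n
  induction n with
  | zero =>
    intro _ L d hL
    simp only [pvInnerP, Nat.cast_zero]
    rw [PySem.List.pyRange_one_eq_nil (by omega)]
    simp only [List.foldl_nil]
    refine ⟨by omega, hL, ?_⟩
    intro r k hr hk
    rw [if_neg (by omega)]
  | succ n ih =>
    intro hn L d hL
    obtain ⟨ih2, ih1, ihg⟩ := ih (by omega) L d hL
    have hsplit : PySem.List.pyRange 0 ((n + 1 : Nat) : Int) 1
        = PySem.List.pyRange 0 (n : Int) 1 ++ [(n : Int)] := by
      push_cast
      exact PySem.List.pyRange_one_succ_right (by omega)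
    simp only [pvInnerP] at ih2 ih1 ihg ⊢
    rw [hsplit, List.foldl_append, List.foldl_cons, List.foldl_nil]
    set P := (PySem.List.pyRange 0 (n : Int) 1).foldl (fun (st : List Int × Int) step =>
      (PySem.List.pySetD st.1
        ((if PySem.Int.mod (c : Int) 2 = 0 then step else ((R : Int) - 1) - step) * (C : Int) + (c : Int))
        (st.2 * 3), st.2 + 1)) (L, d) with hP
    by_cases hpar : c % 2 = 0
    · -- even column: writes row n
      rw [if_pos ((pvMod_iff c).mpr hpar)]
      have hidx : (n : Int) * (C : Int) + (c : Int) = ((n * C + c : Nat) : Int) := by push_cast; ring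
      rw [hidx, PySem.List.pySetD_natCast]
      refine ⟨by simp [ih2]; ring, by simp [ih1], ?_⟩
      intro r k hr hk
      rw [List.getElem?_set]
      by_cases hhit : r = n ∧ k = c
      · obtain ⟨rfl, rfl⟩ := hhit
        rw [if_pos rfl, if_pos (by rw [ih1]; exact pvIdx_lt hr hk), if_pos (by omega), if_pos hpar,
          ih2]
      · have hne : ¬ (n * C + c = r * C + k) := by
          intro hidx2
          obtain ⟨h1, h2⟩ := (pvIdx_eq hC hc hk).mp hidx2
          exact hhit ⟨h1.symm, h2.symm⟩
        rw [if_neg hne, ihg r k hr hk]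
        have hiff : (k = c ∧ ((c % 2 = 0 ∧ r < n) ∨ (c % 2 ≠ 0 ∧ R - n ≤ r)))
            ↔ (k = c ∧ ((c % 2 = 0 ∧ r < n + 1) ∨ (c % 2 ≠ 0 ∧ R - (n + 1) ≤ r))) := by
          constructor
          · rintro ⟨rfl, h⟩; exact ⟨rfl, by omega⟩
          · rintro ⟨rfl, h⟩
            refine ⟨rfl, ?_⟩
            rcases h with ⟨h1, h2⟩ | ⟨h1, h2⟩
            · refine Or.inl ⟨h1, ?_⟩
              have hne2 : r ≠ n := fun hre => hhit ⟨hre, rfl⟩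
              omega
            · exact absurd hpar h1
        exact if_congr hiff rfl rfl
    · -- odd column: writes row R-1-n
      rw [if_neg (fun h => hpar ((pvMod_iff c).mp h))]
      have hidx : ((R : Int) - 1 - (n : Int)) * (C : Int) + (c : Int)
          = (((R - 1 - n) * C + c : Nat) : Int) := by
        have h1 : ((R - 1 - n : Nat) : Int) = (R : Int) - 1 - (n : Int) := by omega
        push_cast [h1]; ring
      rw [hidx, PySem.List.pySetD_natCast]
      refine ⟨by simp [ih2]; ring, by simp [ih1], ?_⟩
      intro r k hr hk
      rw [List.getElem?_set]
      by_cases hhit : r = R - 1 - n ∧ k = c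
      · obtain ⟨hr', rfl⟩ := hhit
        subst hr'
        rw [if_pos rfl, if_pos (by rw [ih1]; exact pvIdx_lt (by omega) hk), if_pos (by omega),
          if_neg hpar, ih2]
        have : (R : Int) - 1 - ((R - 1 - n : Nat) : Int) = (n : Int) := by omega
        rw [this]
      · have hne : ¬ ((R - 1 - n) * C + c = r * C + k) := by
          intro hidx2
          obtain ⟨h1, h2⟩ := (pvIdx_eq hC hc hk).mp hidx2
          exact hhit ⟨h1.symm, h2.symm⟩
        rw [if_neg hne, ihg r k hr hk]
        have hiff : (k = c ∧ ((c % 2 = 0 ∧ r < n) ∨ (c % 2 ≠ 0 ∧ R - n ≤ r)))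
            ↔ (k = c ∧ ((c % 2 = 0 ∧ r < n + 1) ∨ (c % 2 ≠ 0 ∧ R - (n + 1) ≤ r))) := by
          constructor
          · rintro ⟨rfl, h⟩; exact ⟨rfl, by omega⟩
          · rintro ⟨rfl, h⟩
            refine ⟨rfl, ?_⟩
            rcases h with ⟨h1, h2⟩ | ⟨h1, h2⟩
            · exact absurd h1 hpar
            · refine Or.inr ⟨h1, ?_⟩
              have hne : r ≠ R - 1 - n := fun hre => hhit ⟨hre, rfl⟩
              omega
        exact if_congr hiff rfl rfl

theorem pvOuter_spec (C R : Nat) (hC : 0 < C) (_hR : 0 < R) :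
    ∀ m, m ≤ C →
    (pvOuter C R m).2 = ((m * R : Nat) : Int) ∧
    (pvOuter C R m).1.length = R * C ∧
    ∀ r k, r < R → k < C →
      (pvOuter C R m).1[r * C + k]? = if k < m then some (pvCell (R : Int) r k) else some 0 := by
  intro m
  induction m with
  | zero =>
    intro _
    simp only [pvOuter, Nat.cast_zero]
    rw [PySem.List.pyRange_one_eq_nil (by omega)]
    simp only [List.foldl_nil]
    refine ⟨by simp, by simp, ?_⟩
    intro r k hr hk
    rw [if_neg (by omega), List.getElem?_replicate, if_pos (pvIdx_lt hr hk)]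
  | succ m ihm =>
    intro hm
    obtain ⟨ih2, ih1, ihg⟩ := ihm (by omega)
    have hsplit : PySem.List.pyRange 0 ((m + 1 : Nat) : Int) 1
        = PySem.List.pyRange 0 (m : Int) 1 ++ [(m : Int)] := by
      push_cast
      exact PySem.List.pyRange_one_succ_right (by omega)
    simp only [pvOuter] at ih2 ih1 ihg ⊢
    rw [hsplit, List.foldl_append, List.foldl_cons, List.foldl_nil]
    set P := (PySem.List.pyRange 0 (m : Int) 1).foldl (fun st col => pvInnerP C R col R st)
      (List.replicate (R * C) (0 : Int), 0) with hP
    obtain ⟨hin2, hin1, hing⟩ := pvInnerP_spec C R m hC (by omega) R le_rfl P.1 P.2 ih1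
    refine ⟨?_, hin1, ?_⟩
    · rw [hin2, ih2]; push_cast; ring
    · intro r k hr hk
      rw [hing r k hr hk]
      by_cases hkm : k = m
      · subst hkm
        have hcond1 : k = k ∧ (k % 2 = 0 ∧ r < R ∨ k % 2 ≠ 0 ∧ R - R ≤ r) := ⟨rfl, by omega⟩
        rw [if_pos hcond1, if_pos (Nat.lt_succ_self k), ih2]
        unfold pvCell
        by_cases hp : k % 2 = 0
        · rw [if_pos hp]; congr 1
        · rw [if_neg hp]; congr 1
      · rw [if_neg (fun hcond => hkm hcond.1), ihg r k hr hk]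
        exact if_congr (by omega) rfl rfl

theorem pvA_eq (C R : Nat) :
    build_pixel_map (C : Int) (R : Int) = (pvOuter C R C).1 := by
  have hcount : ((C : Int) * (R : Int)).toNat = R * C := by
    rw [show (C : Int) * (R : Int) = ((C * R : Nat) : Int) by push_cast; ring, Int.toNat_natCast,
      Nat.mul_comm]
  simp only [build_pixel_map, pvOuter, pvInnerP, PySem.List.pyRepeat_singleton, hcount]

theorem pvFlat_len {α : Type} (f : Nat → Nat → α) (C R : Nat) :
    ((List.range R).flatMap (fun r => (List.range C).map (f r))).length = R * C := by
  simp [List.length_flatMap, mul_comm]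

theorem pvFlat_get {α : Type} (f : Nat → Nat → α) {C R r k : Nat} (hr : r < R) (hk : k < C) :
    ((List.range R).flatMap (fun r => (List.range C).map (f r)))[r * C + k]? = some (f r k) := by
  induction R with
  | zero => omega
  | succ R' ih =>
    rw [List.range_succ, List.flatMap_append]
    rcases Nat.lt_succ_iff_lt_or_eq.mp hr with h | rfl
    · rw [List.getElem?_append_left (by rw [pvFlat_len]; exact pvIdx_lt h hk)]
      exact ih h
    · rw [List.getElem?_append_right (by rw [pvFlat_len]; exact Nat.le_add_right _ _)]
      rw [pvFlat_len, Nat.add_sub_cancel_left]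
      simp [List.getElem?_map, List.getElem?_range hk]

theorem pvB_eq (C R : Nat) (hC : 0 < C) (hR : 0 < R) :
    build_pixel_map_alt (C : Int) (R : Int)
      = (List.range R).flatMap (fun r => (List.range C).map (fun k => pvCell (R : Int) r k)) := by
  unfold build_pixel_map_alt
  rw [if_neg (by omega)]
  rw [PySem.List.pyRange_one 0 (R : Int), PySem.List.pyRange_one 0 (C : Int)]
  simp only [Int.sub_zero, Int.toNat_natCast, zero_add, List.flatMap_map, List.map_map]
  congr 1
  funext r
  simp only [Function.comp_def]
  apply List.map_congr_left
  intro k _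
  unfold pvCell
  by_cases hp : k % 2 = 0
  · rw [if_pos ((pvMod_iff k).mpr hp), if_pos hp]
  · rw [if_neg (fun h => hp ((pvMod_iff k).mp h)), if_neg hp]

theorem pvB_nil (cols rows : Int) (h : cols ≤ 0 ∨ rows ≤ 0) :
    build_pixel_map_alt cols rows = [] := by
  unfold build_pixel_map_alt
  rw [if_pos h]

theorem pvA_nil (cols rows : Int) (h1 : cols ≤ 0 ∨ rows ≤ 0) (h2 : cols * rows ≤ 0) :
    build_pixel_map cols rows = [] := by
  unfold build_pixel_map
  rcases h1 with hc | hr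
  · rw [show PySem.List.pyRange 0 cols 1 = [] from PySem.List.pyRange_one_eq_nil hc]
    simp [PySem.List.pyRepeat_singleton, Int.toNat_of_nonpos h2]
  · rw [show PySem.List.pyRange 0 rows 1 = [] from PySem.List.pyRange_one_eq_nil hr]
    simp only [List.foldl_nil, List.foldl_fixed]
    simp [PySem.List.pyRepeat_singleton, Int.toNat_of_nonpos h2]

-- ===== VERDICT (by name: the statement is the Claim_ definition above) =====
theorem build_pixel_map_spec : Claim_unchanged_build_pixel_map := by
  intro cols rows _ hD
  by_cases hc : cols ≤ 0
  · have h2 : cols * rows ≤ 0 := by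
      rcases lt_or_ge rows 0 with hneg | hpos
      · have hc0 : cols = 0 := by by_contra h0; exact hD ⟨by omega, hneg⟩
        simp [hc0]
      · exact mul_nonpos_of_nonpos_of_nonneg hc hpos
    rw [pvA_nil cols rows (Or.inl hc) h2, pvB_nil cols rows (Or.inl hc)]
  · by_cases hr : rows ≤ 0
    · have h2 : cols * rows ≤ 0 := mul_nonpos_of_nonneg_of_nonpos (by omega) hr
      rw [pvA_nil cols rows (Or.inr hr) h2, pvB_nil cols rows (Or.inr hr)]
    · have hC : 0 < cols.toNat := by omega
      have hR : 0 < rows.toNat := by omega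
      have hcc : cols = ((cols.toNat : Nat) : Int) := by omega
      have hrc : rows = ((rows.toNat : Nat) : Int) := by omega
      rw [hcc, hrc, pvA_eq, pvB_eq _ _ hC hR]
      obtain ⟨-, hlen, hget⟩ := pvOuter_spec cols.toNat rows.toNat hC hR cols.toNat le_rfl
      apply List.ext_getElem?_iff.mpr
      intro i
      by_cases hi : i < rows.toNat * cols.toNat
      · have hr' : i / cols.toNat < rows.toNat := by
          rw [Nat.div_lt_iff_lt_mul hC]; omega
        have hk' : i % cols.toNat < cols.toNat := Nat.mod_lt _ hC
        have hi' : i = (i / cols.toNat) * cols.toNat + i % cols.toNat := by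
          rw [mul_comm, Nat.div_add_mod]
        rw [hi', hget _ _ hr' hk', pvFlat_get _ hr' hk', if_pos hk']
      · rw [List.getElem?_eq_none (by omega), List.getElem?_eq_none (by rw [pvFlat_len]; omega)]
theorem build_pixel_map_changed : Claim_changed_build_pixel_map := by
  unfold Claim_changed_build_pixel_map; decide
theorem build_pixel_map_tight : Claim_exact_build_pixel_map := by
  intro cols rows _ ⟨hc, hr⟩ h
  rw [pvB_nil cols rows (Or.inl (by omega))] at h
  unfold build_pixel_map at h
  rw [show PySem.List.pyRange 0 cols 1 = [] from PySem.List.pyRange_one_eq_nil (by omega)] at h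
  simp only [List.foldl_nil, PySem.List.pyRepeat_singleton] at h
  have hpos : 0 < cols * rows := mul_pos_of_neg_of_neg hc hr
  rw [List.replicate_eq_nil_iff] at h
  omega
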